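-- pv_equiv track=rewrite | github.com/dsorato/MCSQ_compiling | preprocessing/preprocessing_ess_utils.py | standardize_study_metadata
-- ===== SOURCE A (Python) =====
-- def standardize_study_metadata(study):
-- 	"""
-- 	Transforms study metadata present in the input file to the standard
-- 	used in the MCSQ format.
--
-- 	Args:
-- 		param1 study (string): study metadata extracted from input file (Study column).
--
-- 	Returns:
-- 		Standardized study parameter (string).
-- 	"""
-- 	dict_year_round = {'ESS Round 1':'ESS_R01_2002', 'ESS Round 2':'ESS_R02_2004',
-- 	'ESS Round 3':'ESS_R03_2006', 'ESS Round 4':'ESS_R04_2008', 'ESS Round 5':'ESS_R05_2010',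
-- 	'ESS Round 6':'ESS_R06_2012', 'ESS Round 7':'ESS_R07_2014', 'ESS Round 8':'ESS_R08_2016',
-- 	'ESS Round 9':'ESS_R09_2018'}
--
-- 	for k,v in list(dict_year_round.items()):
-- 		if study == k:
-- 			return v
-- ===== SOURCE B (Python) =====
-- def standardize_study_metadata(study):
-- 	"""Parse 'ESS Round n' (n = 1..9) and build the code arithmetically."""
-- 	prefix = 'ESS Round '
-- 	if study.startswith(prefix) and len(study) == len(prefix) + 1:
-- 		d = study[len(prefix)]
-- 		if '1' <= d <= '9':
-- 			return 'ESS_R0' + d + '_' + str(2000 + 2 * (ord(d) - ord('0')))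
-- 	return None
-- ===== Notes on version B (the rewrite author's own statement) =====
-- stated objective: idiomatic
-- what changed: Replaces the 9-entry dict plus linear scan with direct parsing: check the 'ESS Round ' prefix and a single digit 1-9, then compute the code and year (2000 + 2*round) with arithmetic.
import Mathlib
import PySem

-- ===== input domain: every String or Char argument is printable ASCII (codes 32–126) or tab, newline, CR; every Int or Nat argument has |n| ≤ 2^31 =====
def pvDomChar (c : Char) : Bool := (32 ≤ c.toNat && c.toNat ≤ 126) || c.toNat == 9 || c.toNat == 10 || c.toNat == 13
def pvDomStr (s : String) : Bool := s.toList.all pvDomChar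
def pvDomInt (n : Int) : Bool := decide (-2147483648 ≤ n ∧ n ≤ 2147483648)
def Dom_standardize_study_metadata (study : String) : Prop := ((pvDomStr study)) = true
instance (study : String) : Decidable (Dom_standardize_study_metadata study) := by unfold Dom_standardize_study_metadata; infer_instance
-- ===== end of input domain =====

-- B replaces A's 9-entry table + linear scan by parsing the round digit and computing the code arithmetically (idiomatic; same observable behaviour).

-- ===== PORT A =====
-- the dict literal (distinct keys, insertion order)
def ssmDict : PySem.Dict String String := PySem.Dict.mk
  [("ESS Round 1", "ESS_R01_2002"), ("ESS Round 2", "ESS_R02_2004"),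
   ("ESS Round 3", "ESS_R03_2006"), ("ESS Round 4", "ESS_R04_2008"), ("ESS Round 5", "ESS_R05_2010"),
   ("ESS Round 6", "ESS_R06_2012"), ("ESS Round 7", "ESS_R07_2014"), ("ESS Round 8", "ESS_R08_2016"),
   ("ESS Round 9", "ESS_R09_2018")]

-- the 'for k,v in list(dict.items()): if study == k: return v' loop
def ssmLoop (study : String) : List (String × String) → Option String
  | [] => none
  | (k, v) :: rest => if study == k then some v else ssmLoop study rest

def standardize_study_metadata (study : String) : Option String :=
  ssmLoop study ssmDict.items

-- ===== PORT B =====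
def ssmPrefix : String := "ESS Round "   -- the local 'prefix' variable of B

def standardize_study_metadata_alt (study : String) : Option String :=
  if PySem.Str.startswith study ssmPrefix ∧ PySem.Str.len study = PySem.Str.len ssmPrefix + 1 then
    match PySem.Str.pyGet? study (PySem.Str.len ssmPrefix) with
    | some d =>
      if '1' ≤ d ∧ d ≤ '9' then
        some (String.ofList ("ESS_R0".toList ++ [d] ++ "_".toList ++
          (PySem.Int.toStr (2000 + 2 * ((d.toNat : Int) - 48))).toList))
      else none
    | none => none
  else none

-- ===== PRECONDITION & SPEC =====
def Spec_standardize_study_metadata (study : String) (out : Option String) : Prop := out = standardize_study_metadata_alt study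
instance (study : String) (out : Option String) : Decidable (Spec_standardize_study_metadata study out) := by unfold Spec_standardize_study_metadata; infer_instance

-- ===== CLAIM (what is proved, stated in full; the proofs are below) =====
def Claim_equal_standardize_study_metadata : Prop := ∀ (study : String), Dom_standardize_study_metadata study → Spec_standardize_study_metadata study (standardize_study_metadata study)

-- ===== LEMMAS AND PROOFS =====

lemma char_eq_of_toNat_eq {c c' : Char} (h : c.toNat = c'.toNat) : c = c' :=
  Char.ext (by exact UInt32.toNat_inj.mp h)

lemma digit_cases (c : Char) (h1 : '1' ≤ c) (h2 : c ≤ '9') :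
    c = '1' ∨ c = '2' ∨ c = '3' ∨ c = '4' ∨ c = '5' ∨ c = '6' ∨ c = '7' ∨ c = '8' ∨ c = '9' := by
  have hv1 : 49 ≤ c.toNat := h1
  have hv2 : c.toNat ≤ 57 := h2
  have : c.toNat = 49 ∨ c.toNat = 50 ∨ c.toNat = 51 ∨ c.toNat = 52 ∨ c.toNat = 53 ∨
      c.toNat = 54 ∨ c.toNat = 55 ∨ c.toNat = 56 ∨ c.toNat = 57 := by omega
  rcases this with h | h | h | h | h | h | h | h | h <;>
    [exact Or.inl (char_eq_of_toNat_eq h);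
     exact Or.inr (Or.inl (char_eq_of_toNat_eq h));
     exact Or.inr (Or.inr (Or.inl (char_eq_of_toNat_eq h)));
     exact Or.inr (Or.inr (Or.inr (Or.inl (char_eq_of_toNat_eq h))));
     exact Or.inr (Or.inr (Or.inr (Or.inr (Or.inl (char_eq_of_toNat_eq h)))));
     exact Or.inr (Or.inr (Or.inr (Or.inr (Or.inr (Or.inl (char_eq_of_toNat_eq h))))));
     exact Or.inr (Or.inr (Or.inr (Or.inr (Or.inr (Or.inr (Or.inl (char_eq_of_toNat_eq h)))))));
     exact Or.inr (Or.inr (Or.inr (Or.inr (Or.inr (Or.inr (Or.inr (Or.inl (char_eq_of_toNat_eq h))))))));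
     exact Or.inr (Or.inr (Or.inr (Or.inr (Or.inr (Or.inr (Or.inr (Or.inr (char_eq_of_toNat_eq h))))))))]

-- B either exhibits the parsed shape of the input or returns none on an input of no such shape
lemma alt_shape (study : String) :
    (∃ c, '1' ≤ c ∧ c ≤ '9' ∧ study.toList = "ESS Round ".toList ++ [c]) ∨
    (standardize_study_metadata_alt study = none ∧
      ∀ c, '1' ≤ c → c ≤ '9' → study.toList ≠ "ESS Round ".toList ++ [c]) := by
  by_cases hshape : ∃ c, '1' ≤ c ∧ c ≤ '9' ∧ study.toList = "ESS Round ".toList ++ [c]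
  · exact Or.inl hshape
  · push Not at hshape
    right
    refine ⟨?_, hshape⟩
    unfold standardize_study_metadata_alt ssmPrefix
    split_ifs with hcond
    · obtain ⟨hsw, hlen⟩ := hcond
      -- from startswith + length: study.toList = "ESS Round ".toList ++ [c]
      have hpre : "ESS Round ".toList <+: study.toList :=
        (PySem.Chars.startswith_iff (s := study.toList) (p := "ESS Round ".toList)).mp
          (by simpa using hsw)
      have hlen' : study.toList.length = 11 := by
        rw [show PySem.Str.len "ESS Round " + 1 = 11 from by decide] at hlen
        rw [PySem.Str.len_eq] at hlen
        exact_mod_cast hlen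
      obtain ⟨t, ht⟩ := hpre
      have htlen : t.length = 1 := by
        have hL := congrArg List.length ht
        rw [List.length_append, show ("ESS Round ".toList).length = 10 from by decide] at hL
        omega
      obtain ⟨c, hc⟩ : ∃ c, t = [c] := by
        cases t with
        | nil => simp at htlen
        | cons a u => cases u with
          | nil => exact ⟨a, rfl⟩
          | cons b v => simp at htlen
      subst hc
      have hlist : study.toList = "ESS Round ".toList ++ [c] := ht.symm
      have hget : PySem.Str.pyGet? study 10 = some c := by
        rw [show (10:Int) = ((10:Nat):Int) from by norm_num, PySem.Str.pyGet?_natCast, hlist]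
        rw [List.getElem?_append_right (by decide)]
        simp
      rw [show PySem.Str.len "ESS Round " = 10 from by decide, hget]
      dsimp only
      split_ifs with hd
      · exact absurd hlist (hshape c hd.1 hd.2)
      · rfl
    · rfl

theorem main_eq (study : String) :
    standardize_study_metadata study = standardize_study_metadata_alt study := by
  rcases alt_shape study with ⟨c, h1, h2, hlist⟩ | ⟨hnone, hne⟩
  · rcases digit_cases c h1 h2 with rfl | rfl | rfl | rfl | rfl | rfl | rfl | rfl | rfl <;>
      (have hs := congrArg String.ofList hlist; simp at hs; subst hs; decide)
  · rw [hnone]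
    have n1 : study ≠ "ESS Round 1" := fun e => hne '1' (by decide) (by decide) (by rw [e]; decide)
    have n2 : study ≠ "ESS Round 2" := fun e => hne '2' (by decide) (by decide) (by rw [e]; decide)
    have n3 : study ≠ "ESS Round 3" := fun e => hne '3' (by decide) (by decide) (by rw [e]; decide)
    have n4 : study ≠ "ESS Round 4" := fun e => hne '4' (by decide) (by decide) (by rw [e]; decide)
    have n5 : study ≠ "ESS Round 5" := fun e => hne '5' (by decide) (by decide) (by rw [e]; decide)
    have n6 : study ≠ "ESS Round 6" := fun e => hne '6' (by decide) (by decide) (by rw [e]; decide)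
    have n7 : study ≠ "ESS Round 7" := fun e => hne '7' (by decide) (by decide) (by rw [e]; decide)
    have n8 : study ≠ "ESS Round 8" := fun e => hne '8' (by decide) (by decide) (by rw [e]; decide)
    have n9 : study ≠ "ESS Round 9" := fun e => hne '9' (by decide) (by decide) (by rw [e]; decide)
    simp [standardize_study_metadata, ssmDict, ssmLoop,
      n1, n2, n3, n4, n5, n6, n7, n8, n9]

-- ===== VERDICT (by name: the statement is the Claim_ definition above) =====
theorem standardize_study_metadata_spec : Claim_equal_standardize_study_metadata := by
  intro study _
  exact main_eq study
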